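-- pv_equiv track=rewrite | github.com/Seedname/Bananagrams | bananagrams/decrypt.py | generate_keystrings
-- ===== SOURCE A (Python) =====
-- def generate_keystrings(keyspace: dict, alphabet: str) -> str:
--     def generate_recursive(current_key: str, next_index: int):
--         if next_index == len(alphabet):
--             yield current_key
--             return
--         next_letter = alphabet[next_index]
--         possible_values = keyspace[next_letter]
--         for letter in possible_values:
--             if letter not in current_key:
--                 yield from generate_recursive(current_key + letter, next_index + 1)
--
--     yield from generate_recursive('', 0)
-- ===== SOURCE B (Python) =====
-- def generate_keystrings(keyspace: dict, alphabet: str):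
--     # Breadth-first: grow all partial keys one alphabet letter at a time.
--     results = ['']
--     for ch in alphabet:
--         results = [k + v for k in results for v in keyspace[ch] if v not in k]
--     yield from results
-- ===== Notes on version B (the rewrite author's own statement) =====
-- stated objective: idiomatic
-- what changed: B replaces the recursive backtracking generator by a single breadth-first fold over the alphabet that rebuilds the whole list of partial keys with a comprehension at each letter (evaluating keyspace[ch] lazily, so it raises and prunes exactly where A does).
-- outside the precondition, e.g. on generate_keystrings({'a': []}, 'ab'): A returns [], B returns []
import Mathlib
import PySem

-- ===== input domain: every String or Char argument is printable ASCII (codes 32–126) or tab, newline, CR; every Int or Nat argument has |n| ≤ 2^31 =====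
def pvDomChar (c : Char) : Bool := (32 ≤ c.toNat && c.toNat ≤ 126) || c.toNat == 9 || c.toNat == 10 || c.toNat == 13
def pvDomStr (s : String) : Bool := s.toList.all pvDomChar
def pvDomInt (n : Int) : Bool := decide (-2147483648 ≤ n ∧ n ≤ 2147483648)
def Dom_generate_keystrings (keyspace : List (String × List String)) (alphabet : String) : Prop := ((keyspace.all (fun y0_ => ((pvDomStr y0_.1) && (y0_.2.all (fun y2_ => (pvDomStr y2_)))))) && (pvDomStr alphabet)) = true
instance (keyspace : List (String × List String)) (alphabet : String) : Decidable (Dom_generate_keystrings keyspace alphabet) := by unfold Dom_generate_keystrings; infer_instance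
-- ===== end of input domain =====

-- B: breadth-first level-by-level expansion instead of A's recursive backtracking generator;
-- equivalence of the return value (both Pythons are generators, compared as the list of yields).


-- ===== PORT A =====
-- generate_recursive(current_key, next_index): structural recursion over the remaining
-- suffix of the alphabet (alphabet[next_index:]); keyspace[next_letter] is getD with
-- default [], exact because Pre_ guarantees the key is present.
def pvGenRec (keyspace : List (String × List String)) : String → List Char → List String
  | current_key, [] => [current_key]
  | current_key, next_letter :: rest =>
    let possible_values := PySem.Dict.getD (PySem.Dict.mk keyspace) (String.ofList [next_letter]) []
    possible_values.foldl
      (fun acc letter =>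
        if PySem.Str.isIn letter current_key then acc
        else acc ++ pvGenRec keyspace (current_key ++ letter) rest) []

def generate_keystrings (keyspace : List (String × List String)) (alphabet : String) : List String :=
  pvGenRec keyspace "" alphabet.toList

-- ===== PORT B =====
-- results = ['']; for ch in alphabet: results = [k+v for k in results for v in keyspace[ch] if v not in k]
def generate_keystrings_alt (keyspace : List (String × List String)) (alphabet : String) : List String :=
  alphabet.toList.foldl
    (fun results ch =>
      results.flatMap (fun k =>
        ((PySem.Dict.getD (PySem.Dict.mk keyspace) (String.ofList [ch]) []).filter
          (fun v => !(PySem.Str.isIn v k))).map (fun v => k ++ v)))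
    [""]

-- ===== PRECONDITION & SPEC =====
-- Pre_ excludes a missing alphabet key, on which both Pythons raise KeyError unless an earlier
-- empty/exhausted value list prunes the search first — in that prune case A still returns []
-- (and B does too), so Pre_ is slightly narrower than the raising inputs.
def Pre_generate_keystrings (keyspace : List (String × List String)) (alphabet : String) : Prop :=
  (alphabet.toList.all (fun c => (PySem.Dict.mk keyspace).contains (String.ofList [c]))) = true
instance (keyspace : List (String × List String)) (alphabet : String) : Decidable (Pre_generate_keystrings keyspace alphabet) := by unfold Pre_generate_keystrings; infer_instance

def pvWitness_generate_keystrings : (List (String × List String)) × String :=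
  ([("a", ["x", "y"]), ("b", ["x", "z"])], "ab")

def Spec_generate_keystrings (keyspace : List (String × List String)) (alphabet : String) (out : List String) : Prop := out = generate_keystrings_alt keyspace alphabet
instance (keyspace : List (String × List String)) (alphabet : String) (out : List String) : Decidable (Spec_generate_keystrings keyspace alphabet out) := by unfold Spec_generate_keystrings; infer_instance

-- ===== CLAIM (what is proved, stated in full; the proofs are below) =====
def Claim_equal_generate_keystrings : Prop := ∀ (keyspace : List (String × List String)) (alphabet : String), Dom_generate_keystrings keyspace alphabet → Pre_generate_keystrings keyspace alphabet → Spec_generate_keystrings keyspace alphabet (generate_keystrings keyspace alphabet)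

-- ===== LEMMAS AND PROOFS =====

-- A's inner 'for letter in possible: if letter not in current: out += rec(...)' loop as filter+flatMap
lemma foldl_skip_if_append {α β : Type} (p : α → Bool) (f : α → List β) (l : List α) (acc : List β) :
    l.foldl (fun a x => if p x then a else a ++ f x) acc
      = acc ++ (l.filter (fun x => !p x)).flatMap f := by
  induction l generalizing acc with
  | nil => simp
  | cons x xs ih =>
    by_cases h : p x = true <;> simp [List.foldl_cons, h, ih, List.append_assoc]

-- invariant: flatMapping A's recursion over a level of partial keys equals B's fold over the rest
lemma level_invariant (keyspace : List (String × List String)) (rest : List Char) :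
    ∀ L : List String,
      L.flatMap (fun k => pvGenRec keyspace k rest)
        = rest.foldl
            (fun results ch =>
              results.flatMap (fun k =>
                ((PySem.Dict.getD (PySem.Dict.mk keyspace) (String.ofList [ch]) []).filter
                  (fun v => !(PySem.Str.isIn v k))).map (fun v => k ++ v))) L := by
  induction rest with
  | nil => intro L; simp [pvGenRec]
  | cons c rest ih =>
    intro L
    rw [List.foldl_cons, ← ih, List.flatMap_assoc]
    simp only [pvGenRec, foldl_skip_if_append, List.nil_append, List.flatMap_map]

-- ===== VERDICT (by name: the statement is the Claim_ definition above) =====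
theorem generate_keystrings_spec : Claim_equal_generate_keystrings := by
  intro keyspace alphabet _ _
  unfold Spec_generate_keystrings generate_keystrings generate_keystrings_alt
  have h := level_invariant keyspace alphabet.toList [""]
  simpa using h
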